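-- pv_equiv track=rewrite | github.com/lierik/Sentence-Similarity-Analysis | bleu_pretest_multi_gram.py | sentence_pretreatment
-- ===== SOURCE A (Python) =====
-- def sentence_pretreatment(sentence,stopwords,is_ref=False):
--     if not is_ref:
--         for stopword in stopwords:
--             if stopword in sentence:
--                 sentence=sentence.replace(stopword,'、')
--     else:
--         for stopword in stopwords:
--             if stopword in sentence:
--                 sentence=sentence.replace(stopword,'|')
--
--     if sentence[0]=='、':
--         new_sentence=''
--     else:
--         new_sentence=sentence[0]
--
--     pos=1
--     while pos<len(sentence):
--         if sentence[pos-1]!=sentence[pos]: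
--             new_sentence+=sentence[pos]
--         pos+=1
--     if new_sentence[-1]=='、':
--         new_sentence=new_sentence[:-1]
--     return new_sentence
-- ===== SOURCE B (Python) =====
-- def sentence_pretreatment(sentence, stopwords, is_ref=False):
--     rep = '|' if is_ref else '、'
--     for stopword in stopwords:
--         sentence = sentence.replace(stopword, rep)
--     # collapse runs by squeezing doubled characters to a fixpoint, one character at a time
--     for c in dict.fromkeys(sentence):
--         while c + c in sentence:
--             sentence = sentence.replace(c + c, c)
--     return sentence.strip('、')
-- ===== Notes on version B (the rewrite author's own statement) =====
-- stated objective: alternative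
-- what changed: Merged the two identical stopword branches into one replace loop, and replaced A's index-by-index adjacent-comparison scan with a completely different collapse strategy: for each distinct character c of the string, repeatedly str.replace c+c by c until no doubled c remains (a global-rewrite fixpoint), then a single strip('、') instead of A's manual first/last-char trimming.
import Mathlib
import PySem

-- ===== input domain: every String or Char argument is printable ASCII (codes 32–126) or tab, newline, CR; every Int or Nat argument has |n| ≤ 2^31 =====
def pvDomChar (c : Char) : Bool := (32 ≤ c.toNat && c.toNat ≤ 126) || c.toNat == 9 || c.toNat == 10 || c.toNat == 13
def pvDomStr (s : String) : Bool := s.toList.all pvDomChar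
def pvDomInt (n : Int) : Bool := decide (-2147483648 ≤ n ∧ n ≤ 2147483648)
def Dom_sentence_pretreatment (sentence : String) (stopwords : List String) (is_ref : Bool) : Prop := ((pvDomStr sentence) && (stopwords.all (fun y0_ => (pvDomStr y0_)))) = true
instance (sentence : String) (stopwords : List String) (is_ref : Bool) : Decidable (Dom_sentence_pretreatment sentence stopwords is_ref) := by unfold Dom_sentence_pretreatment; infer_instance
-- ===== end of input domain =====

-- B merges the two identical stopword-replacement branches and collapses runs by a different
-- algorithm: for each distinct character c it rewrites c+c -> c globally to a fixpoint, then
-- trims with one strip('、') instead of A's manual first/last-char checks (objective: alternative).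

-- ===== PORT A =====
-- 'for stopword in stopwords: if stopword in sentence: sentence = sentence.replace(stopword, r)'
def pvReplLoopA (r : String) (sentence : String) (stopwords : List String) : String :=
  stopwords.foldl (fun acc w => if PySem.Str.isIn w acc then PySem.Str.replace acc w r else acc) sentence

def sentence_pretreatment (sentence : String) (stopwords : List String) (is_ref : Bool) : String :=
  let s : String := if !is_ref then pvReplLoopA "、" sentence stopwords
                    else pvReplLoopA "|" sentence stopwords
  let l : List Char := s.toList
  -- 'if sentence[0]=="、": new_sentence="" else: new_sentence=sentence[0]'
  match PySem.List.pyGet? l 0 with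
  | none => ""            -- Python raises IndexError here; excluded by Pre_
  | some c0 =>
    let new0 : List Char := if c0 = '、' then [] else [c0]
    -- 'pos=1; while pos<len(sentence): if sentence[pos-1]!=sentence[pos]: new_sentence+=sentence[pos]; pos+=1'
    -- (pos ∈ [1, len), so both indices are always in range and pyGetD with any default is exact)
    let newS : List Char := (PySem.List.pyRange 1 (l.length : Int) 1).foldl
      (fun acc pos => if PySem.List.pyGetD l (pos-1) ' ' ≠ PySem.List.pyGetD l pos ' '
                      then acc ++ [PySem.List.pyGetD l pos ' '] else acc) new0
    -- 'if new_sentence[-1]=="、": new_sentence=new_sentence[:-1]'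
    match PySem.List.pyGet? newS (-1) with
    | none => ""          -- Python raises IndexError here; excluded by Pre_
    | some cl => if cl = '、' then String.ofList newS.dropLast else String.ofList newS

-- ===== PORT B =====
-- 'while c + c in sentence: sentence = sentence.replace(c + c, c)'.  The fuel bounds the
-- number of iterations: each replace removes at least one character, so the initial length
-- always suffices (a totality guard only; proved exact below).
def pvSqueeze (c : Char) : Nat → String → String
  | 0, s => s
  | fuel+1, s =>
    if PySem.Str.isIn (String.ofList [c, c]) s
    then pvSqueeze c fuel (PySem.Str.replace s (String.ofList [c, c]) (String.ofList [c]))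
    else s

def sentence_pretreatment_alt (sentence : String) (stopwords : List String) (is_ref : Bool) : String :=
  let rep : String := if is_ref then "|" else "、"
  let s : String := stopwords.foldl (fun acc w => PySem.Str.replace acc w rep) sentence
  -- 'for c in dict.fromkeys(sentence): while c+c in sentence: sentence = sentence.replace(c+c, c)'
  let t : String := (PySem.List.dedup s.toList).foldl
      (fun acc c => pvSqueeze c acc.toList.length acc) s
  PySem.Str.stripChars t "、"

-- ===== PRECONDITION & SPEC =====
-- Pre_ holds exactly on the inputs where A returns: the sentence after the stopword
-- replacements still has a character other than '、'.  Otherwise A raises IndexError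
-- (sentence[0] on the empty string, new_sentence[-1] when everything collapsed to '、');
-- B returns the empty string on those inputs.
def Pre_sentence_pretreatment (sentence : String) (stopwords : List String) (is_ref : Bool) : Prop :=
  ((stopwords.foldl (fun acc w => PySem.Str.replace acc w (if is_ref then "|" else "、")) sentence).toList.any
    (fun c => !(c == '、'))) = true
instance (sentence : String) (stopwords : List String) (is_ref : Bool) : Decidable (Pre_sentence_pretreatment sentence stopwords is_ref) := by unfold Pre_sentence_pretreatment; infer_instance

def pvWitness_sentence_pretreatment : String × List String × Bool := ("ab", ["a"], false)

def Spec_sentence_pretreatment (sentence : String) (stopwords : List String) (is_ref : Bool) (out : String) : Prop := out = sentence_pretreatment_alt sentence stopwords is_ref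
instance (sentence : String) (stopwords : List String) (is_ref : Bool) (out : String) : Decidable (Spec_sentence_pretreatment sentence stopwords is_ref out) := by unfold Spec_sentence_pretreatment; infer_instance

-- ===== CLAIM (what is proved, stated in full; the proofs are below) =====
def Claim_equal_sentence_pretreatment : Prop := ∀ (sentence : String) (stopwords : List String) (is_ref : Bool), Dom_sentence_pretreatment sentence stopwords is_ref → Pre_sentence_pretreatment sentence stopwords is_ref → Spec_sentence_pretreatment sentence stopwords is_ref (sentence_pretreatment sentence stopwords is_ref)

-- ===== LEMMAS AND PROOFS =====

-- (1) replacement phase: replacing an absent stopword is the identity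
lemma pv_replace_go_no_occ (old new : List Char) (fuel : Nat) :
    ∀ (l acc : List Char), ¬ old <:+: l → l.length ≤ fuel →
      PySem.Chars.replace.go old new fuel l acc = acc.reverse ++ l := by
  induction fuel with
  | zero =>
    intro l acc _ hlen
    have : l = [] := List.length_eq_zero_iff.mp (Nat.le_zero.mp hlen)
    subst this
    simp [PySem.Chars.replace.go]
  | succ n ih =>
    intro l acc hinf hlen
    cases l with
    | nil => simp [PySem.Chars.replace.go]
    | cons c t =>
      rw [PySem.Chars.replace.go]
      have hpre : old.isPrefixOf (c :: t) = false := by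
        by_contra h
        exact hinf (List.IsPrefix.isInfix
          (List.isPrefixOf_iff_prefix.mp (Bool.not_eq_false _ |>.mp h)))
      rw [hpre]
      simp only [Bool.false_eq_true, if_false]
      rw [ih t (c :: acc) (fun h => hinf (h.trans (List.suffix_cons c t).isInfix))
        (by simpa using Nat.le_of_succ_le_succ hlen)]
      simp

lemma pv_replace_not_isIn (s w r : List Char) (h : PySem.Chars.isIn w s = false) :
    PySem.Chars.replace s w r = s := by
  have hinf : ¬ w <:+: s := (PySem.Chars.isIn_eq_false_iff w s).mp h
  have hw : w ≠ [] := by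
    rintro rfl
    rw [PySem.Chars.isIn_nil] at h; simp at h
  unfold PySem.Chars.replace
  rw [if_neg (by simpa using hw)]
  simpa using pv_replace_go_no_occ w r s.length s [] hinf le_rfl

lemma pv_repl_loops_eq (r : String) (stopwords : List String) (sentence : String) :
    pvReplLoopA r sentence stopwords =
      stopwords.foldl (fun acc w => PySem.Str.replace acc w r) sentence := by
  induction stopwords generalizing sentence with
  | nil => rfl
  | cons w ws ih =>
    simp only [pvReplLoopA, List.foldl_cons] at *
    by_cases h : PySem.Str.isIn w sentence
    · rw [if_pos h]; exact ih _
    · rw [if_neg h]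
      have hrep : PySem.Str.replace sentence w r = sentence := by
        apply String.toList_injective
        rw [PySem.Str.toList_replace]
        exact pv_replace_not_isIn sentence.toList w.toList r.toList
          (by simpa [PySem.Str.isIn] using h)
      rw [hrep]; exact ih _

-- (2) the collapse result: adjacency filter carrying the previous character (A's loop in list form)
def pvAdj : Char → List Char → List Char
  | _, [] => []
  | c, b :: t => if c ≠ b then b :: pvAdj b t else pvAdj b t

-- chain property of the collapsed list
lemma pv_adj_chain (t : List Char) : ∀ c, List.IsChain (· ≠ ·) (c :: pvAdj c t) := by
  induction t with
  | nil => intro c; simp [pvAdj]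
  | cons b t' ih =>
    intro c
    rw [pvAdj]
    by_cases h : c = b
    · rw [if_neg (by simpa using h)]
      subst h; exact ih c
    · rw [if_pos (by simpa using h)]
      exact List.isChain_cons_cons.mpr ⟨h, ih b⟩

-- membership is preserved by collapsing
lemma pv_adj_mem (t : List Char) : ∀ c x, x ∈ c :: t → x ∈ c :: pvAdj c t := by
  induction t with
  | nil => intro c x h; simpa [pvAdj] using h
  | cons b t' ih =>
    intro c x h
    rw [pvAdj]
    by_cases hcb : c = b
    · rw [if_neg (by simpa using hcb)]
      subst hcb
      rcases List.mem_cons.mp h with h | h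
      · simp [h]
      · exact ih c x h
    · rw [if_pos (by simpa using hcb)]
      rcases List.mem_cons.mp h with h | h
      · simp [h]
      · exact List.mem_cons_of_mem c (ih b x h)

-- A's indexed fold computes pvAdj
lemma pv_fold_adj (l : List Char) (rest : List Char) : ∀ (k : Nat) (c : Char) (acc : List Char),
    l[k]? = some c → l.drop (k+1) = rest →
    (PySem.List.pyRange ((k:Int)+1) (l.length : Int) 1).foldl
      (fun acc pos => if PySem.List.pyGetD l (pos-1) ' ' ≠ PySem.List.pyGetD l pos ' '
                      then acc ++ [PySem.List.pyGetD l pos ' '] else acc) acc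
      = acc ++ pvAdj c rest := by
  induction rest with
  | nil =>
    intro k c acc hk hdrop
    have hklt : k < l.length := (List.getElem?_eq_some_iff.mp hk).1
    have hlen : l.length ≤ k + 1 := by
      have := congrArg List.length hdrop
      simp at this
      omega
    rw [PySem.List.pyRange_one_eq_nil (by omega)]
    simp [pvAdj]
  | cons b t ih =>
    intro k c acc hk hdrop
    have hklt : k < l.length := (List.getElem?_eq_some_iff.mp hk).1
    have hk1 : k + 1 < l.length := by
      have := congrArg List.length hdrop
      simp at this
      omega
    have hb : l[k+1]? = some b := by
      have h1 : (l.drop (k+1))[0]? = l[k+1+0]? := List.getElem?_drop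
      rw [hdrop] at h1
      simpa using h1.symm
    have hcv : l.getD k ' ' = c := by
      rw [List.getD_eq_getElem?_getD, hk]; rfl
    have hbv : l.getD (k+1) ' ' = b := by
      rw [List.getD_eq_getElem?_getD, hb]; rfl
    have e1 : PySem.List.pyGetD l ((k:Int)+1-1) ' ' = c := by
      rw [show ((k:Int)+1-1) = ((k:Nat):Int) by ring,
        PySem.List.pyGetD_of_nonneg l ' ' (by positivity)]
      simpa using hcv
    have e2 : PySem.List.pyGetD l ((k:Int)+1) ' ' = b := by
      rw [show ((k:Int)+1) = (((k+1:Nat)):Int) by push_cast; ring,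
        PySem.List.pyGetD_of_nonneg l ' ' (by positivity)]
      simpa using hbv
    have hdt : l.drop (k+1+1) = t := by
      have h1 : (l.drop (k+1)).drop 1 = t := by rw [hdrop]; rfl
      rw [List.drop_drop] at h1
      exact h1
    rw [PySem.List.pyRange_one_cons (by omega)]
    simp only [List.foldl_cons]
    rw [e1, e2]
    have hih := ih (k+1) b (if c ≠ b then acc ++ [b] else acc) hb hdt
    rw [show ((k:Int)+1+1) = (((k+1:Nat)):Int)+1 by omega]
    rw [hih]
    rw [pvAdj]
    by_cases hcb : c = b
    · simp [hcb]
    · simp [hcb]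

-- negative-one indexing is getLast?
lemma pv_pyGet_neg_one {α : Type} (xs : List α) (h : xs ≠ []) :
    PySem.List.pyGet? xs (-1) = xs.getLast? := by
  have hn : 0 < xs.length := List.length_pos_iff.mpr h
  simp only [PySem.List.pyGet?, PySem.List.pyIdx?]
  rw [if_neg (by omega), if_pos (by omega)]
  simp [List.getLast?_eq_getElem?]

-- (3) one strip step on a chain list drops at most the head
lemma pv_dropWhile_one (xs : List Char) (h : List.IsChain (· ≠ ·) xs) :
    xs.dropWhile (fun c => c == '、') =
      if xs.head? = some '、' then xs.tail else xs := by
  cases xs with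
  | nil => simp
  | cons a t =>
    by_cases ha : a = '、'
    · subst ha
      rw [List.dropWhile_cons_of_pos (by simp)]
      simp only [List.head?_cons, List.tail_cons]
      rw [if_pos (by simp)]
      cases t with
      | nil => simp
      | cons b t' =>
        have hab : '、' ≠ b := (List.isChain_cons_cons.mp h).1
        exact List.dropWhile_cons_of_neg (by simpa using (Ne.symm hab))
    · rw [List.dropWhile_cons_of_neg (by simpa using ha)]
      simp only [List.head?_cons]
      rw [if_neg (by simpa using ha)]

-- A's manual trim of the collapsed list equals strip('、') of it
lemma pv_trim_eq (c0 : Char) (rest : List Char) (c : Char)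
    (hcL : c ∈ c0 :: rest) (hcy : c ≠ '、') :
    (match PySem.List.pyGet? ((if c0 = '、' then [] else [c0]) ++ pvAdj c0 rest) (-1) with
     | none => ""
     | some cl => if cl = '、'
        then String.ofList ((if c0 = '、' then [] else [c0]) ++ pvAdj c0 rest).dropLast
        else String.ofList ((if c0 = '、' then [] else [c0]) ++ pvAdj c0 rest))
      = PySem.Str.stripChars (String.ofList (c0 :: pvAdj c0 rest)) "、" := by
  have hchain : List.IsChain (· ≠ ·) (c0 :: pvAdj c0 rest) := pv_adj_chain rest c0
  have hcR : c ∈ c0 :: pvAdj c0 rest := pv_adj_mem rest c0 c hcL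
  have hp : (fun x => List.contains "、".toList x) = (fun x : Char => x == '、') := by
    funext x
    by_cases hx : x = '、' <;> simp [hx]
  have hM : (if c0 = '、' then [] else [c0]) ++ pvAdj c0 rest
      = (c0 :: pvAdj c0 rest).dropWhile (fun x => x == '、') := by
    rw [pv_dropWhile_one _ hchain]
    by_cases h0 : c0 = '、' <;> simp [h0]
  set M : List Char := (c0 :: pvAdj c0 rest).dropWhile (fun x => x == '、') with hMdef
  have hcM : c ∈ M := by
    rw [hMdef, pv_dropWhile_one _ hchain]
    by_cases h0 : c0 = '、'
    · rw [if_pos (by simp [h0])]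
      rcases List.mem_cons.mp hcR with h | h
      · exact absurd (h.trans h0) hcy
      · simpa using h
    · rw [if_neg (by simp [h0])]
      exact hcR
  have hMne : M ≠ [] := List.ne_nil_of_mem hcM
  have hchainM : List.IsChain (· ≠ ·) M := hchain.suffix (List.dropWhile_suffix _)
  have hchainMr : List.IsChain (· ≠ ·) M.reverse :=
    List.isChain_reverse.mpr (hchainM.imp (fun _ _ h => h.symm))
  rw [hM, pv_pyGet_neg_one M hMne]
  obtain ⟨ll, hll⟩ := Option.isSome_iff_exists.mp (List.getLast?_isSome.mpr hMne)
  rw [hll]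
  apply String.toList_injective
  rw [PySem.Str.toList_stripChars, String.toList_ofList]
  show _ = PySem.Chars.stripChars (c0 :: pvAdj c0 rest) "、".toList
  unfold PySem.Chars.stripChars
  rw [hp]
  dsimp only
  rw [← hMdef, pv_dropWhile_one M.reverse hchainMr, List.head?_reverse, hll]
  by_cases hl : ll = '、'
  · rw [if_pos (by simp [hl]), if_pos (by simp [hl]), List.tail_reverse, List.reverse_reverse,
      String.toList_ofList]
  · rw [if_neg (by simp [hl]), if_neg (by simp [hl]), List.reverse_reverse, String.toList_ofList]

-- (4) B's squeeze step at list level: one pass of replace(c+c, c)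
def pvF (c : Char) : List Char → List Char
  | [] => []
  | [a] => [a]
  | a :: b :: t => if a = c ∧ b = c then c :: pvF c t else a :: pvF c (b :: t)

-- 'has a doubled c' predicate
def pvDD (c : Char) : List Char → Bool
  | a :: b :: t => (a == c && b == c) || pvDD c (b :: t)
  | _ => false

lemma pv_replace_go_dd (c : Char) (fuel : Nat) :
    ∀ (l acc : List Char), l.length ≤ fuel →
      PySem.Chars.replace.go [c, c] [c] fuel l acc = acc.reverse ++ pvF c l := by
  induction fuel with
  | zero =>
    intro l acc hlen
    have : l = [] := List.length_eq_zero_iff.mp (Nat.le_zero.mp hlen)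
    subst this
    simp [PySem.Chars.replace.go, pvF]
  | succ n ih =>
    intro l acc hlen
    match l with
    | [] => simp [PySem.Chars.replace.go, pvF]
    | [a] =>
      rw [PySem.Chars.replace.go]
      have hpre : List.isPrefixOf [c, c] [a] = false := by simp [List.isPrefixOf]
      rw [hpre]
      simp only [Bool.false_eq_true, if_false]
      rw [ih [] (a :: acc) (by simp)]
      simp [pvF]
    | a :: b :: t =>
      rw [PySem.Chars.replace.go]
      by_cases hab : a = c ∧ b = c
      · rw [show List.isPrefixOf [c, c] (a :: b :: t) = true by
          simp [List.isPrefixOf, hab.1, hab.2]]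
        rw [if_pos rfl]
        rw [show List.drop [c,c].length (a :: b :: t) = t from rfl]
        rw [ih t ([c].reverse ++ acc) (by simp at hlen ⊢; omega)]
        rw [pvF, if_pos hab]
        simp
      · have hpre : List.isPrefixOf [c, c] (a :: b :: t) = false := by
          rcases not_and_or.mp hab with h | h
          · simp [List.isPrefixOf]; intro h'; exact absurd h'.symm h
          · simp [List.isPrefixOf]; intro _ h'; exact absurd h'.symm h
        rw [hpre]
        simp only [Bool.false_eq_true, if_false]
        rw [ih (b :: t) (a :: acc) (by simp at hlen ⊢; omega)]
        rw [pvF, if_neg hab]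
        simp

lemma pv_replace_dd (c : Char) (l : List Char) :
    PySem.Chars.replace l [c, c] [c] = pvF c l := by
  unfold PySem.Chars.replace
  rw [if_neg (by simp)]
  simpa using pv_replace_go_dd c l.length l [] le_rfl

-- [c,c] is an infix iff pvDD
lemma pv_infix_dd (c : Char) (l : List Char) : [c, c] <:+: l ↔ pvDD c l = true := by
  induction l with
  | nil => simp [pvDD]
  | cons a t ih =>
    rw [List.infix_cons_iff]
    constructor
    · rintro (h | h)
      · obtain ⟨u, hu⟩ := h
        cases t with
        | nil =>
          have := congrArg List.length hu
          simp at this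
        | cons b t' =>
          have h1 : a = c ∧ b = c := by
            have := hu
            simp only [List.cons_append, List.cons.injEq] at this
            exact ⟨this.1.symm, this.2.1.symm⟩
          rw [pvDD]
          simp [h1.1, h1.2]
      · cases t with
        | nil => simp at h
        | cons b t' =>
          rw [pvDD]
          simp [ih.mp h]
    · intro h
      cases t with
      | nil => simp [pvDD] at h
      | cons b t' =>
        rw [pvDD] at h
        rcases Bool.or_eq_true _ _ |>.mp h with h | h
        · obtain ⟨h1, h2⟩ := Bool.and_eq_true _ _ |>.mp h
          left
          exact ⟨t', by simp [beq_iff_eq.mp h1, beq_iff_eq.mp h2]⟩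
        · right; exact ih.mpr h

lemma pv_isIn_dd (c : Char) (l : List Char) : PySem.Chars.isIn [c, c] l = pvDD c l := by
  rw [Bool.eq_iff_iff, PySem.Chars.isIn_iff_infix]
  exact pv_infix_dd c l

-- properties of pvF
lemma pv_dd_tail (d a : Char) (t : List Char) (h : pvDD d (a :: t) = false) :
    pvDD d t = false := by
  cases t with
  | nil => simp [pvDD]
  | cons b t' => rw [pvDD] at h; exact (Bool.or_eq_false_iff.mp h).2

lemma pv_dd_cons (d a : Char) (t : List Char) (h : a ≠ d) :
    pvDD d (a :: t) = pvDD d t := by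
  cases t with
  | nil => simp [pvDD]
  | cons b t' => rw [pvDD]; simp [h]

lemma pvF_length (c : Char) : ∀ (l : List Char), (pvF c l).length ≤ l.length := by
  intro l
  induction l using pvF.induct c with
  | case1 => simp [pvF]
  | case2 a => simp [pvF]
  | case3 a b t hab ih => rw [pvF, if_pos hab]; simp at ih ⊢; omega
  | case4 a b t hab ih => rw [pvF, if_neg hab]; simp at ih ⊢; omega

lemma pvF_length_lt (c : Char) : ∀ (l : List Char), pvDD c l = true → (pvF c l).length < l.length := by
  intro l
  induction l using pvF.induct c with
  | case1 => simp [pvDD]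
  | case2 a => simp [pvDD]
  | case3 a b t hab ih =>
    intro _
    rw [pvF, if_pos hab]
    have := pvF_length c t
    simp at this ⊢
    omega
  | case4 a b t hab ih =>
    intro h
    rw [pvF, if_neg hab]
    rw [pvDD] at h
    rcases Bool.or_eq_true _ _ |>.mp h with h | h
    · exact absurd ⟨beq_iff_eq.mp (Bool.and_eq_true _ _ |>.mp h).1,
        beq_iff_eq.mp (Bool.and_eq_true _ _ |>.mp h).2⟩ hab
    · have := ih h
      simp at this ⊢
      omega

lemma pvF_head (c : Char) : ∀ (l : List Char), (pvF c l).head? = l.head? := by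
  intro l
  induction l using pvF.induct c with
  | case1 => simp [pvF]
  | case2 a => simp [pvF]
  | case3 a b t hab ih => rw [pvF, if_pos hab]; simp [hab.1]
  | case4 a b t hab ih => rw [pvF, if_neg hab]; simp

lemma pvF_mem (c : Char) : ∀ (l : List Char) (x : Char), x ∈ pvF c l → x ∈ l := by
  intro l
  induction l using pvF.induct c with
  | case1 => simp [pvF]
  | case2 a => simp [pvF]
  | case3 a b t hab ih =>
    intro x hx
    rw [pvF, if_pos hab] at hx
    rcases List.mem_cons.mp hx with h | h
    · rw [h, ← hab.1]
      exact List.mem_cons_self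
    · exact List.mem_cons_of_mem a (List.mem_cons_of_mem b (ih x h))
  | case4 a b t hab ih =>
    intro x hx
    rw [pvF, if_neg hab] at hx
    rcases List.mem_cons.mp hx with h | h
    · rw [h]
      exact List.mem_cons_self
    · exact List.mem_cons_of_mem a (ih x h)

lemma pvF_adj (c : Char) : ∀ (l : List Char) (d : Char), pvAdj d (pvF c l) = pvAdj d l := by
  intro l
  induction l using pvF.induct c with
  | case1 => intro d; simp [pvF]
  | case2 a => intro d; simp [pvF]
  | case3 a b t hab ih =>
    intro d
    rw [pvF, if_pos hab]
    rw [hab.1, hab.2]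
    rw [pvAdj]
    conv_rhs => rw [pvAdj]
    by_cases hd : d = c
    · rw [if_neg (by simpa using hd), if_neg (by simpa using hd)]
      rw [ih c]
      conv_rhs => rw [pvAdj, if_neg (by simp)]
    · rw [if_pos (by simpa using hd), if_pos (by simpa using hd)]
      rw [ih c]
      conv_rhs => rw [pvAdj, if_neg (by simp)]
  | case4 a b t hab ih =>
    intro d
    rw [pvF, if_neg hab]
    rw [pvAdj]
    conv_rhs => rw [pvAdj]
    by_cases hd : d = a
    · rw [if_neg (by simpa using hd), if_neg (by simpa using hd), ih a]
    · rw [if_pos (by simpa using hd), if_pos (by simpa using hd), ih a]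

lemma pvF_dd (c d : Char) (hdc : d ≠ c) : ∀ (l : List Char),
    pvDD d l = false → pvDD d (pvF c l) = false := by
  intro l
  induction l using pvF.induct c with
  | case1 => simp [pvF, pvDD]
  | case2 a => simp [pvF, pvDD]
  | case3 a b t hab ih =>
    intro h
    rw [pvF, if_pos hab]
    rw [hab.1, hab.2] at h
    rw [pv_dd_cons d c _ (fun h' => hdc h'.symm)]
    exact ih (pv_dd_tail d c _ (pv_dd_tail d c _ h))
  | case4 a b t hab ih =>
    intro h
    rw [pvF, if_neg hab]
    have htail : pvDD d (pvF c (b :: t)) = false := ih (pv_dd_tail d a _ h)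
    have hhead : (pvF c (b :: t)).head? = some b := by rw [pvF_head]; rfl
    obtain ⟨u, hu⟩ : ∃ u, pvF c (b :: t) = b :: u := by
      cases hf : pvF c (b :: t) with
      | nil => rw [hf] at hhead; simp at hhead
      | cons x u => rw [hf] at hhead; simp at hhead; exact ⟨u, by rw [hhead]⟩
    rw [hu] at htail ⊢
    rw [pvDD]
    have hpair : (a == d && b == d) = false := by
      rw [pvDD] at h
      exact (Bool.or_eq_false_iff.mp h).1
    rw [hpair, htail]
    simp

-- (5) the while-loop (pvSqueeze) at String level
lemma pv_squeeze_spec (c : Char) (fuel : Nat) : ∀ (s : String), s.toList.length ≤ fuel →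
    pvDD c (pvSqueeze c fuel s).toList = false ∧
    (∀ d, pvAdj d (pvSqueeze c fuel s).toList = pvAdj d s.toList) ∧
    (pvSqueeze c fuel s).toList.head? = s.toList.head? ∧
    (∀ x ∈ (pvSqueeze c fuel s).toList, x ∈ s.toList) ∧
    (∀ d, d ≠ c → pvDD d s.toList = false → pvDD d (pvSqueeze c fuel s).toList = false) := by
  induction fuel with
  | zero =>
    intro s hlen
    have h0 : s.toList = [] := List.length_eq_zero_iff.mp (Nat.le_zero.mp hlen)
    rw [pvSqueeze]
    exact ⟨by rw [h0]; rfl, fun d => rfl, rfl, fun x hx => hx, fun d _ h => h⟩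
  | succ n ih =>
    intro s hlen
    rw [pvSqueeze]
    by_cases hin : PySem.Str.isIn (String.ofList [c, c]) s
    · rw [if_pos hin]
      have hddl : pvDD c s.toList = true := by
        have := hin
        rw [PySem.Str.isIn] at this
        rw [String.toList_ofList] at this
        rwa [pv_isIn_dd] at this
      have hrep : (PySem.Str.replace s (String.ofList [c, c]) (String.ofList [c])).toList
          = pvF c s.toList := by
        rw [PySem.Str.toList_replace, String.toList_ofList, String.toList_ofList]
        exact pv_replace_dd c s.toList
      have hlt : (pvF c s.toList).length < s.toList.length := pvF_length_lt c s.toList hddl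
      have hle : (PySem.Str.replace s (String.ofList [c, c]) (String.ofList [c])).toList.length ≤ n := by
        rw [hrep]; omega
      obtain ⟨q1, q2, q3, q4, q5⟩ := ih _ hle
      refine ⟨q1, ?_, ?_, ?_, ?_⟩
      · intro d
        rw [q2 d, hrep, pvF_adj]
      · rw [q3, hrep, pvF_head]
      · intro x hx
        exact pvF_mem c s.toList x (hrep ▸ q4 x hx)
      · intro d hd h
        exact q5 d hd (by rw [hrep]; exact pvF_dd c d hd s.toList h)
    · rw [if_neg hin]
      have hddl : pvDD c s.toList = false := by
        have : PySem.Str.isIn (String.ofList [c, c]) s = false := by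
          exact Bool.not_eq_true _ |>.mp hin
        rw [PySem.Str.isIn, String.toList_ofList, pv_isIn_dd] at this
        exact this
      exact ⟨hddl, fun d => rfl, rfl, fun x hx => hx, fun d _ h => h⟩

-- (6) the fold over the distinct characters
lemma pv_fold_squeeze (cs : List Char) (hnd : cs.Nodup) : ∀ (s : String),
    (∀ d, pvAdj d ((cs.foldl (fun acc c => pvSqueeze c acc.toList.length acc) s)).toList = pvAdj d s.toList) ∧
    ((cs.foldl (fun acc c => pvSqueeze c acc.toList.length acc) s)).toList.head? = s.toList.head? ∧
    (∀ x ∈ ((cs.foldl (fun acc c => pvSqueeze c acc.toList.length acc) s)).toList, x ∈ s.toList) ∧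
    (∀ d, d ∉ cs → pvDD d s.toList = false →
      pvDD d ((cs.foldl (fun acc c => pvSqueeze c acc.toList.length acc) s)).toList = false) ∧
    (∀ d ∈ cs, pvDD d ((cs.foldl (fun acc c => pvSqueeze c acc.toList.length acc) s)).toList = false) := by
  induction cs with
  | nil =>
    intro s
    exact ⟨fun d => rfl, rfl, fun x hx => hx, fun d _ h => h, fun d hd => absurd hd (by simp)⟩
  | cons c cs' ih =>
    intro s
    have hnd' : cs'.Nodup := (List.nodup_cons.mp hnd).2
    have hcn : c ∉ cs' := (List.nodup_cons.mp hnd).1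
    obtain ⟨q1, q2, q3, q4, q5⟩ := pv_squeeze_spec c s.toList.length s le_rfl
    simp only [List.foldl_cons]
    obtain ⟨r1, r2, r3, r4, r5⟩ := ih hnd' (pvSqueeze c s.toList.length s)
    refine ⟨?_, ?_, ?_, ?_, ?_⟩
    · intro d; rw [r1 d, q2 d]
    · rw [r2, q3]
    · intro x hx; exact q4 x (r3 x hx)
    · intro d hd h
      have hdc : d ≠ c := fun h' => hd (by simp [h'])
      have hd' : d ∉ cs' := fun h' => hd (by simp [h'])
      exact r4 d hd' (q5 d hdc h)
    · intro d hd
      rcases List.mem_cons.mp hd with h | h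
      · subst h
        exact r4 d hcn q1
      · exact r5 d h

-- (7) a list with no doubled character anywhere is a chain, and pvAdj is the identity on chains
lemma pv_chain_of_noDD : ∀ (l : List Char), (∀ x ∈ l, pvDD x l = false) → List.IsChain (· ≠ ·) l := by
  intro l
  induction l with
  | nil => intro _; simp
  | cons a t ih =>
    intro h
    cases t with
    | nil => simp
    | cons b t' =>
      have hab : a ≠ b := by
        intro hab
        have := h a (by simp)
        rw [pvDD] at this
        simp [hab] at this
      refine List.isChain_cons_cons.mpr ⟨hab, ?_⟩
      apply ih
      intro x hx
      exact pv_dd_tail x a _ (h x (by simp [hx]))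

lemma pv_adj_id_of_chain : ∀ (u : List Char) (a : Char),
    List.IsChain (· ≠ ·) (a :: u) → pvAdj a u = u := by
  intro u
  induction u with
  | nil => intro a _; rfl
  | cons b u' ih =>
    intro a h
    obtain ⟨hab, h'⟩ := List.isChain_cons_cons.mp h
    rw [pvAdj, if_pos (by simpa using hab), ih b h']

-- (8) B's collapse phase computes exactly c0 :: pvAdj c0 rest
lemma pv_alt_collapse (s : String) (c0 : Char) (rest : List Char) (hs : s.toList = c0 :: rest) :
    ((PySem.List.dedup s.toList).foldl (fun acc c => pvSqueeze c acc.toList.length acc) s).toList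
      = c0 :: pvAdj c0 rest := by
  obtain ⟨r1, r2, r3, r4, r5⟩ :=
    pv_fold_squeeze (PySem.List.dedup s.toList) (PySem.List.nodup_dedup s.toList) s
  set t := ((PySem.List.dedup s.toList).foldl (fun acc c => pvSqueeze c acc.toList.length acc) s).toList with ht
  have hchain : List.IsChain (· ≠ ·) t := by
    apply pv_chain_of_noDD
    intro x hx
    have hxd : x ∈ PySem.List.dedup s.toList := by
      rw [PySem.List.mem_dedup]
      exact r3 x hx
    exact r5 x hxd
  obtain ⟨u, hu⟩ : ∃ u, t = c0 :: u := by
    have := r2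
    rw [hs] at this
    cases htl : t with
    | nil => rw [htl] at this; simp at this
    | cons y u =>
      rw [htl] at this
      simp at this
      exact ⟨u, by rw [this]⟩
  have hd : ∃ d : Char, d ≠ c0 := by
    by_cases h : c0 = 'a'
    · exact ⟨'b', by rw [h]; decide⟩
    · exact ⟨'a', fun h' => h h'.symm⟩
  obtain ⟨d, hdc⟩ := hd
  have hadj := r1 d
  rw [hs, hu] at hadj
  rw [pvAdj, pvAdj, if_pos (by simpa using hdc), if_pos (by simpa using hdc)] at hadj
  have hu' : u = pvAdj c0 rest := by
    have hid : pvAdj c0 u = u := pv_adj_id_of_chain u c0 (hu ▸ hchain)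
    rw [hid] at hadj
    injection hadj
  rw [hu, hu']

-- ===== VERDICT (by name: the statement is the Claim_ definition above) =====
theorem sentence_pretreatment_spec : Claim_equal_sentence_pretreatment := by
  intro sentence stopwords is_ref hdom hpre
  unfold Pre_sentence_pretreatment at hpre
  unfold Spec_sentence_pretreatment sentence_pretreatment sentence_pretreatment_alt
  have hrepl : (if !is_ref then pvReplLoopA "、" sentence stopwords
                else pvReplLoopA "|" sentence stopwords)
      = stopwords.foldl
          (fun acc w => PySem.Str.replace acc w (if is_ref then "|" else "、")) sentence := by
    cases is_ref <;> simp [pv_repl_loops_eq]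
  dsimp only
  rw [hrepl]
  set L : String := stopwords.foldl
    (fun acc w => PySem.Str.replace acc w (if is_ref then "|" else "、")) sentence with hLdef
  obtain ⟨c, hcl, hcy⟩ : ∃ c ∈ L.toList, c ≠ '、' := by
    obtain ⟨c, hc1, hc2⟩ := List.any_eq_true.mp hpre
    exact ⟨c, hc1, by simpa using hc2⟩
  obtain ⟨c0, rest, hL⟩ : ∃ c0 rest, L.toList = c0 :: rest := by
    cases h : L.toList with
    | nil => rw [h] at hcl; simp at hcl
    | cons a t => exact ⟨a, t, rfl⟩
  rw [hL]
  rw [show PySem.List.pyGet? (c0 :: rest) 0 = some c0 from by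
    simp [PySem.List.pyGet?, PySem.List.pyIdx?]]
  dsimp only
  have hfold := pv_fold_adj (c0 :: rest) rest 0 c0
    (if c0 = '、' then [] else [c0]) (by simp) (by simp)
  rw [show ((0:Nat):Int)+1 = 1 by norm_num] at hfold
  rw [hfold]
  rw [pv_trim_eq c0 rest c (hL ▸ hcl) hcy]
  congr 1
  apply String.toList_injective
  rw [String.toList_ofList]
  have hcol := pv_alt_collapse L c0 rest hL
  rw [hL] at hcol
  exact hcol.symm
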